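-- pv_equiv track=rewrite | github.com/hanchangha1127/Code-Learning-Platform | server/features/learning/generator_normalize.py | _normalize_code_blame_commits
-- ===== SOURCE A (Python) =====
-- from typing import Any
--
-- def _normalize_code_blame_commits(value: Any, candidate_count: int) -> list[dict[str, str]]:
--     option_ids = ("A", "B", "C", "D", "E")[: max(1, int(candidate_count or 1))]
--     cleaned: list[dict[str, str]] = []
--     if isinstance(value, list):
--         for entry in value:
--             if not isinstance(entry, dict):
--                 continue
--             option_id = str(entry.get("option_id") or entry.get("optionId") or "").strip().upper()
--             if option_id not in option_ids:
--                 continue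
--             title = str(entry.get("title") or "").strip() or f"Commit {option_id}"
--             diff = str(entry.get("diff") or "").rstrip()
--             cleaned.append({"optionId": option_id, "title": title, "diff": diff})
--
--     by_id = {row["optionId"]: row for row in cleaned}
--     normalized: list[dict[str, str]] = []
--     for option_id in option_ids:
--         row = by_id.get(option_id)
--         if not row:
--             row = {
--                 "optionId": option_id,
--                 "title": f"Commit {option_id}",
--                 "diff": "diff --git a/app.py b/app.py\n@@\n+pass",
--             }
--         normalized.append(row)
--     return normalized
-- ===== SOURCE B (Python) =====
-- def _normalize_code_blame_commits(value, candidate_count):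
--     option_ids = ("A", "B", "C", "D", "E")[: max(1, int(candidate_count or 1))]
--     out = []
--     for option_id in option_ids:
--         hit = None
--         if isinstance(value, list):
--             for entry in value:
--                 if not isinstance(entry, dict):
--                     continue
--                 oid = str(entry.get("option_id") or entry.get("optionId") or "").strip().upper()
--                 if oid == option_id:
--                     hit = entry  # last match wins, like the dict overwrite in A
--         if hit is None:
--             out.append({
--                 "optionId": option_id,
--                 "title": f"Commit {option_id}",
--                 "diff": "diff --git a/app.py b/app.py\n@@\n+pass",
--             })
--         else:
--             title = str(hit.get("title") or "").strip() or f"Commit {option_id}"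
--             out.append({
--                 "optionId": option_id,
--                 "title": title,
--                 "diff": str(hit.get("diff") or "").rstrip(),
--             })
--     return out
-- ===== Notes on version B (the rewrite author's own statement) =====
-- stated objective: simpler
-- what changed: B drops A's intermediate cleaned list and by_id dict: for each option id in order it does one last-match scan of the raw value list and builds the row (or the default) directly.
import Mathlib
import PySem

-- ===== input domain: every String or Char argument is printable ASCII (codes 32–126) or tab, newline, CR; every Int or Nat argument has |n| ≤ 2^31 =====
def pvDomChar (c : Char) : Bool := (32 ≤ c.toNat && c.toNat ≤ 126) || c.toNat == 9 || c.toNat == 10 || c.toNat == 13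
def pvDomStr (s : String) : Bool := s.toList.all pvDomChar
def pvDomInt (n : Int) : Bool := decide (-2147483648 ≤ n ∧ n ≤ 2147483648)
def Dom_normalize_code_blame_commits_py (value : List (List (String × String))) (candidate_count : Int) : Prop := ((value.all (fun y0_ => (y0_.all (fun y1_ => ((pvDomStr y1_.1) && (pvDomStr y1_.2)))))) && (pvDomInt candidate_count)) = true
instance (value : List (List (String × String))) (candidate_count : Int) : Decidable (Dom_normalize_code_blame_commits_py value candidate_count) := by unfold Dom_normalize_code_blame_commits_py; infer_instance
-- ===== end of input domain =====

-- B replaces A's cleaned-list + by_id-dict pipeline with one last-match scan of `value` per option id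
-- (objective: simpler — no intermediate index, same output).

-- ===== PORT A =====
-- shared Python idioms appearing verbatim in both sources:
-- `dict.get(k)` on the str→str dict (first match on the association list = Python dict lookup)
def pvGetS (entry : List (String × String)) (k : String) : Option String := List.lookup k entry

-- `<optional string> or <default>`: None and "" are falsy
def pvOrS (o : Option String) (d : String) : String :=
  match o with
  | some s => if s = "" then d else s
  | none => d

-- ("A","B","C","D","E")[: max(1, int(candidate_count or 1))]; the bound is ≥ 1, so the
-- Python slice [:k] is exactly List.take k.toNat
def pvOptionIds (candidate_count : Int) : List String :=
  List.take (max 1 (if candidate_count = 0 then 1 else candidate_count)).toNat ["A", "B", "C", "D", "E"]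

-- str(entry.get("option_id") or entry.get("optionId") or "").strip().upper()
def pvNormId (entry : List (String × String)) : String :=
  PySem.Str.upper (PySem.Str.strip (pvOrS (pvGetS entry "option_id") (pvOrS (pvGetS entry "optionId") "")))

-- the default commit dict
def pvDefaultRow (oid : String) : List (String × String) :=
  [("optionId", oid), ("title", "Commit " ++ oid), ("diff", "diff --git a/app.py b/app.py\n@@\n+pass")]

-- the cleaned row A appends: {"optionId": option_id, "title": ..., "diff": ...}
def pvRowOf (entry : List (String × String)) : List (String × String) :=
  let oid := pvNormId entry
  let t := PySem.Str.strip (pvOrS (pvGetS entry "title") "")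
  [("optionId", oid),
   ("title", if t = "" then "Commit " ++ oid else t),
   ("diff", PySem.Str.rstrip (pvOrS (pvGetS entry "diff") ""))]

-- row["optionId"] in the comprehension; the key is always present in a cleaned row, so
-- first-match lookup with a dummy default is exact
def pvRowKey (row : List (String × String)) : String := (List.lookup "optionId" row).getD ""

def normalize_code_blame_commits_py (value : List (List (String × String))) (candidate_count : Int) : List (List (String × String)) :=
  let option_ids := pvOptionIds candidate_count
  -- value : list[dict[str,str]], so the isinstance checks always pass
  let cleaned : List (List (String × String)) :=
    value.foldl (fun acc entry =>
      if pvNormId entry ∈ option_ids then acc ++ [pvRowOf entry] else acc) []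
  let by_id : PySem.Dict String (List (String × String)) :=
    cleaned.foldl (fun d row => d.insert (pvRowKey row) row) PySem.Dict.empty
  option_ids.foldl (fun acc oid =>
    acc ++ [match by_id.get? oid with
            | some row => if row = [] then pvDefaultRow oid else row  -- `if not row`
            | none => pvDefaultRow oid]) []

-- ===== PORT B =====
def normalize_code_blame_commits_py_alt (value : List (List (String × String))) (candidate_count : Int) : List (List (String × String)) :=
  (pvOptionIds candidate_count).map (fun option_id =>
    -- hit = last entry whose normalized id equals option_id (forward scan, last wins)
    match value.foldl (fun hit entry =>
            if pvNormId entry = option_id then some entry else hit) none with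
    | none => pvDefaultRow option_id
    | some hit =>
      let t := PySem.Str.strip (pvOrS (pvGetS hit "title") "")
      [("optionId", option_id),
       ("title", if t = "" then "Commit " ++ option_id else t),
       ("diff", PySem.Str.rstrip (pvOrS (pvGetS hit "diff") ""))])

-- ===== PRECONDITION & SPEC =====
def Spec_normalize_code_blame_commits_py (value : List (List (String × String))) (candidate_count : Int) (out : List (List (String × String))) : Prop := out = normalize_code_blame_commits_py_alt value candidate_count
instance (value : List (List (String × String))) (candidate_count : Int) (out : List (List (String × String))) : Decidable (Spec_normalize_code_blame_commits_py value candidate_count out) := by unfold Spec_normalize_code_blame_commits_py; infer_instance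

-- ===== CLAIM (what is proved, stated in full; the proofs are below) =====
def Claim_equal_normalize_code_blame_commits_py : Prop := ∀ (value : List (List (String × String))) (candidate_count : Int), Dom_normalize_code_blame_commits_py value candidate_count → Spec_normalize_code_blame_commits_py value candidate_count (normalize_code_blame_commits_py value candidate_count)

-- ===== LEMMAS AND PROOFS =====

theorem pvRowKey_rowOf (e : List (String × String)) : pvRowKey (pvRowOf e) = pvNormId e := by
  simp [pvRowKey, pvRowOf]

theorem pvRowOf_ne_nil (e : List (String × String)) : pvRowOf e ≠ [] := by
  simp [pvRowOf]

theorem pv_cleaned_eq (ids : List String) (value : List (List (String × String))) :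
    value.foldl (fun acc entry => if pvNormId entry ∈ ids then acc ++ [pvRowOf entry] else acc) []
      = List.map pvRowOf (value.filter (fun e => decide (pvNormId e ∈ ids))) := by
  simpa using PySem.List.foldl_append_if (fun e => decide (pvNormId e ∈ ids)) pvRowOf value []

/-- Folding `insert` over rows: the final lookup is the LAST row with the given key,
    else the lookup in the initial dict — stated as a last-wins scan. -/
theorem pv_get_foldl_insert (rows : List (List (String × String)))
    (d : PySem.Dict String (List (String × String))) (k : String) :
    (rows.foldl (fun d row => d.insert (pvRowKey row) row) d).get? k
      = rows.foldl (fun acc row => if pvRowKey row = k then some row else acc) (d.get? k) := by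
  induction rows generalizing d with
  | nil => rfl
  | cons r rs ih =>
    simp only [List.foldl_cons, ih, PySem.Dict.get?_insert]
    congr 1
    by_cases h : pvRowKey r = k
    · simp [h]
    · simp [h, Ne.symm h]

/-- The scan over cleaned rows equals (the row-image of) B's last-match scan over entries,
    provided the target id is among the admitted option ids. -/
theorem pv_scan_rows_eq (ids : List String) (oid : String) (hmem : oid ∈ ids)
    (l : List (List (String × String))) (acc : Option (List (String × String))) :
    ((List.map pvRowOf (l.filter (fun e => decide (pvNormId e ∈ ids)))).foldl
        (fun a row => if pvRowKey row = oid then some row else a) (acc.map pvRowOf))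
      = (l.foldl (fun hit e => if pvNormId e = oid then some e else hit) acc).map pvRowOf := by
  induction l generalizing acc with
  | nil => rfl
  | cons e l ih =>
    by_cases hp : pvNormId e ∈ ids
    · have : (if pvRowKey (pvRowOf e) = oid then some (pvRowOf e) else acc.map pvRowOf)
          = (if pvNormId e = oid then some e else acc).map pvRowOf := by
        rw [pvRowKey_rowOf]
        by_cases h : pvNormId e = oid <;> simp [h]
      simp only [List.filter_cons, hp, decide_true, if_true, List.map_cons, List.foldl_cons]
      rw [this, ih]
    · have hne : pvNormId e ≠ oid := fun h => hp (h ▸ hmem)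
      simp only [List.filter_cons, hp, decide_false, Bool.false_eq_true, if_false,
        List.foldl_cons, hne, ih]

/-- B's scan only ever returns an entry matching the target id (starting from none). -/
theorem pv_scan_id (oid : String) (l : List (List (String × String)))
    (acc : Option (List (String × String)))
    (hacc : ∀ e, acc = some e → pvNormId e = oid) :
    ∀ e, (l.foldl (fun hit e => if pvNormId e = oid then some e else hit) acc) = some e →
      pvNormId e = oid := by
  induction l generalizing acc with
  | nil => exact hacc
  | cons x l ih =>
    intro e he
    rw [List.foldl_cons] at he
    refine ih _ ?_ e he
    intro e' he'
    split at he'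
    · next h => cases he'; exact h
    · exact hacc e' he'

-- ===== VERDICT (by name: the statement is the Claim_ definition above) =====
theorem normalize_code_blame_commits_py_spec : Claim_equal_normalize_code_blame_commits_py := by
  intro value candidate_count _
  unfold Spec_normalize_code_blame_commits_py
  unfold normalize_code_blame_commits_py normalize_code_blame_commits_py_alt
  simp only [pv_cleaned_eq, PySem.List.foldl_append_singleton_eq_map, List.nil_append]
  apply List.map_congr_left
  intro oid hmem
  have hget := pv_get_foldl_insert
    (List.map pvRowOf ((pvOptionIds candidate_count |> fun ids => value.filter
      (fun e => decide (pvNormId e ∈ ids)))))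
    PySem.Dict.empty oid
  simp only [PySem.Dict.get?_empty] at hget
  have hscan := pv_scan_rows_eq (pvOptionIds candidate_count) oid hmem value none
  simp only [Option.map_none] at hscan
  rw [hget, hscan]
  cases hs : value.foldl (fun hit e => if pvNormId e = oid then some e else hit)
      (none : Option (List (String × String))) with
  | none => rfl
  | some hit =>
    have hid : pvNormId hit = oid := pv_scan_id oid value none (by intro e h; cases h) hit hs
    simp only [Option.map_some]
    rw [if_neg (pvRowOf_ne_nil hit)]
    simp only [pvRowOf]
    rw [hid]
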